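-- pv_equiv track=rewrite | github.com/YanivHajaj/Metastability-Containing-Hardware-Final-Project | Metastability_Final.py | detect_metastability
-- ===== SOURCE A (Python) =====
-- def detect_metastability(bitsets):
--     # Determine the length of the bitsets
--     bit_length = len(bitsets[0])
--
--     # Initialize the result with zeros
--     result = ['0'] * bit_length
--
--     # Check each bit position for metastability
--     for i in range(bit_length):
--         # Extract the ith bit from each bitset
--         bits_at_i = [bitset[i] for bitset in bitsets]
--
--         # If not all bits are the same, mark as metastable
--         if len(set(bits_at_i)) > 1:
--             result[i] = 'M'
--         else:
--             # Otherwise, use the bit value (all the same)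
--             result[i] = bits_at_i[0]
--
--     return ''.join(result)
-- ===== SOURCE B (Python) =====
-- def detect_metastability(bitsets):
--     # Row-major: start from the first bitset, mark 'M' wherever a later bitset disagrees.
--     first = bitsets[0]
--     bit_length = len(first)
--     result = list(first)
--     for bitset in bitsets[1:]:
--         for i in range(bit_length):
--             if bitset[i] != first[i]:
--                 result[i] = 'M'
--     return ''.join(result)
-- ===== Notes on version B (the rewrite author's own statement) =====
-- stated objective: alternative
-- what changed: B traverses row-major, seeding the result with the first bitset and overwriting a position with 'M' when any later bitset disagrees there, instead of A's column-major pass that builds the set of characters at each position and tests its cardinality.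
import Mathlib
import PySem

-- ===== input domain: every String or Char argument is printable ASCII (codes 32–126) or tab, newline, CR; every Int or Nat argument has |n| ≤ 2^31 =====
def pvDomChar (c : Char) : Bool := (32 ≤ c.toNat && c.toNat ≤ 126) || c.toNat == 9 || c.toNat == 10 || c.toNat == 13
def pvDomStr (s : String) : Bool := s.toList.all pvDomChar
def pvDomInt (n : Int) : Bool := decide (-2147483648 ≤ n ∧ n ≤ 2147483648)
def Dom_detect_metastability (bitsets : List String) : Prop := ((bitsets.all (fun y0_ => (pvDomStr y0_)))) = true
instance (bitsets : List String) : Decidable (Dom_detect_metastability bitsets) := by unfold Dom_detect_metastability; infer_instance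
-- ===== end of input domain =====

-- B replaces A's column-major set-cardinality test by a row-major pass that seeds the
-- result with the first bitset and overwrites disagreeing positions with 'M' (objective: alternative).

-- ===== PORT A =====
def detect_metastability (bitsets : List String) : String :=
  -- bit_length = len(bitsets[0])
  let first := ((PySem.List.pyGet? bitsets 0).getD "").toList
  let bitLength : Int := first.length
  -- result = ['0'] * bit_length
  -- for i in range(bit_length): …
  let result := (PySem.List.pyRange 0 bitLength 1).foldl (fun res i =>
      -- bits_at_i = [bitset[i] for bitset in bitsets]
      let bitsAtI := bitsets.map (fun bitset => (PySem.List.pyGet? bitset.toList i).getD ' ')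
      -- if len(set(bits_at_i)) > 1: result[i] = 'M' else: result[i] = bits_at_i[0]
      if 1 < PySem.Set.len (PySem.Set.ofList bitsAtI) then
        PySem.List.pySetD res i 'M'
      else
        PySem.List.pySetD res i ((PySem.List.pyGet? bitsAtI 0).getD ' '))
    (List.replicate bitLength.toNat '0')
  String.ofList result

-- ===== PORT B =====
def detect_metastability_alt (bitsets : List String) : String :=
  -- first = bitsets[0]; bit_length = len(first); result = list(first)
  let first := ((PySem.List.pyGet? bitsets 0).getD "").toList
  let bitLength : Int := first.length
  -- for bitset in bitsets[1:]: for i in range(bit_length): if bitset[i] != first[i]: result[i] = 'M'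
  let result := (PySem.List.slice bitsets (some 1) none).foldl (fun res bitset =>
      (PySem.List.pyRange 0 bitLength 1).foldl (fun r i =>
        if (PySem.List.pyGet? bitset.toList i).getD ' ' ≠ (PySem.List.pyGet? first i).getD ' ' then
          PySem.List.pySetD r i 'M'
        else r) res)
    first
  String.ofList result

-- ===== PRECONDITION & SPEC =====
-- Pre_: bitsets nonempty and every bitset at least as long as the first one;
-- otherwise A (and B) raise IndexError (bitsets[0] / bitset[i]).
def Pre_detect_metastability (bitsets : List String) : Prop :=
  bitsets ≠ [] ∧ ∀ s ∈ bitsets, (bitsets.headD "").toList.length ≤ s.toList.length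
instance (bitsets : List String) : Decidable (Pre_detect_metastability bitsets) := by
  unfold Pre_detect_metastability; infer_instance
def pvWitness_detect_metastability : List String := ["010", "011", "110"]

def Spec_detect_metastability (bitsets : List String) (out : String) : Prop := out = detect_metastability_alt bitsets
instance (bitsets : List String) (out : String) : Decidable (Spec_detect_metastability bitsets out) := by unfold Spec_detect_metastability; infer_instance

-- ===== CLAIM (what is proved, stated in full; the proofs are below) =====
def Claim_equal_detect_metastability : Prop := ∀ (bitsets : List String), Dom_detect_metastability bitsets → Pre_detect_metastability bitsets → Spec_detect_metastability bitsets (detect_metastability bitsets)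

-- ===== LEMMAS AND PROOFS =====

-- two distinct members force length ≥ 2
theorem pv_two_le_length {l : List Char} {a b : Char} (ha : a ∈ l) (hb : b ∈ l)
    (hne : a ≠ b) : 2 ≤ l.length := by
  match l with
  | [] => simp at ha
  | [x] =>
    simp at ha hb
    exact absurd (ha.trans hb.symm) hne
  | x :: y :: t => simp

-- folding Set.add with elements already present does nothing
theorem pv_foldl_add_const (c : Char) :
    ∀ (t : List Char), (∀ x ∈ t, x = c) → t.foldl PySem.Set.add [c] = [c] := by
  intro t
  induction t with
  | nil => intro _; rfl
  | cons x xs ih =>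
    intro h
    have hx : x = c := h x (by simp)
    subst hx
    simp only [List.foldl]
    have hadd : PySem.Set.add [x] x = [x] := by
      simp [PySem.Set.add, PySem.Set.contains]
    rw [hadd]
    exact ih (fun y hy => h y (by simp [hy]))

theorem pv_set_card_gt_one (c : Char) (t : List Char) :
    1 < PySem.Set.len (PySem.Set.ofList (c :: t)) ↔ ∃ x ∈ t, x ≠ c := by
  constructor
  · intro hlen
    by_contra hall
    simp only [not_exists, not_and, ne_eq, not_not] at hall
    have : PySem.Set.ofList (c :: t) = [c] := by
      rw [PySem.Set.ofList_eq_foldl]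
      simp only [List.foldl]
      have : PySem.Set.add ([] : List Char) c = [c] := by
        simp [PySem.Set.add, PySem.Set.contains]
      rw [this]
      exact pv_foldl_add_const c t hall
    rw [this] at hlen
    simp [PySem.Set.len] at hlen
  · rintro ⟨x, hx, hne⟩
    have hc : c ∈ PySem.Set.ofList (c :: t) := (PySem.Set.mem_ofList _ _).2 (by simp)
    have hx' : x ∈ PySem.Set.ofList (c :: t) := (PySem.Set.mem_ofList _ _).2 (by simp [hx])
    have := pv_two_le_length hx' hc hne
    simp [PySem.Set.len]
    omega

-- characterization of A's write loop: the value written at i does not depend on res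
theorem pv_foldA_get? (n : Int) (C : Int → Prop) [DecidablePred C] (w : Int → Char) :
    ∀ (k : Nat) (a : Int), 0 ≤ a → (n - a).toNat = k → ∀ (res : List Char) (j : Nat),
      ((PySem.List.pyRange a n 1).foldl
          (fun r i => if C i then PySem.List.pySetD r i 'M' else PySem.List.pySetD r i (w i)) res)[j]? =
        if a ≤ (j : Int) ∧ (j : Int) < n ∧ j < res.length
        then some (if C (j : Int) then 'M' else w j) else res[j]? := by
  intro k
  induction k with
  | zero =>
    intro a ha hk res j
    rw [PySem.List.pyRange_one_eq_nil (by omega)]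
    simp only [List.foldl]
    rw [if_neg (by omega)]
  | succ m ih =>
    intro a ha hk res j
    rw [PySem.List.pyRange_one_cons (by omega)]
    simp only [List.foldl]
    have hstep : (if C a then PySem.List.pySetD res a 'M' else PySem.List.pySetD res a (w a))
        = PySem.List.pySetD res a (if C a then 'M' else w a) := by split_ifs <;> rfl
    rw [hstep]
    rw [ih (a + 1) (by omega) (by omega)]
    rw [PySem.List.pySetD_of_nonneg res (if C a then 'M' else w a) ha]
    rw [List.length_set, List.getElem?_set]
    by_cases hja : (j : Int) = a
    · rw [if_neg (show ¬(a + 1 ≤ (j : Int) ∧ (j : Int) < n ∧ j < res.length) by omega),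
          if_pos (show a.toNat = j by omega)]
      by_cases hl : j < res.length
      · rw [if_pos (show a.toNat < res.length by omega),
            if_pos (show a ≤ (j : Int) ∧ (j : Int) < n ∧ j < res.length from ⟨by omega, by omega, hl⟩)]
        rw [show a = ((j : Nat) : Int) from hja.symm]
      · rw [if_neg (show ¬ a.toNat < res.length by omega),
            if_neg (show ¬(a ≤ (j : Int) ∧ (j : Int) < n ∧ j < res.length) by omega),
            List.getElem?_eq_none (by omega)]
    · rw [if_neg (show ¬ a.toNat = j by omega)]
      by_cases h1 : a + 1 ≤ (j : Int) ∧ (j : Int) < n ∧ j < res.length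
      · rw [if_pos h1, if_pos (show a ≤ (j : Int) ∧ (j : Int) < n ∧ j < res.length from ⟨by omega, h1.2.1, h1.2.2⟩)]
      · rw [if_neg h1, if_neg (show ¬(a ≤ (j : Int) ∧ (j : Int) < n ∧ j < res.length) by
              intro h; exact h1 ⟨by omega, h.2.1, h.2.2⟩)]

-- characterization of B's inner loop over one bitset
theorem pv_foldB_get? (n : Int) (p : Int → Prop) [DecidablePred p] :
    ∀ (k : Nat) (a : Int), 0 ≤ a → (n - a).toNat = k → ∀ (res : List Char) (j : Nat),
      ((PySem.List.pyRange a n 1).foldl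
          (fun r i => if p i then PySem.List.pySetD r i 'M' else r) res)[j]? =
        if a ≤ (j : Int) ∧ (j : Int) < n ∧ j < res.length ∧ p j then some 'M' else res[j]? := by
  intro k
  induction k with
  | zero =>
    intro a ha hk res j
    rw [PySem.List.pyRange_one_eq_nil (by omega)]
    simp only [List.foldl]
    rw [if_neg (by omega)]
  | succ m ih =>
    intro a ha hk res j
    rw [PySem.List.pyRange_one_cons (by omega)]
    simp only [List.foldl]
    by_cases hpa : p a
    · rw [if_pos hpa]
      rw [ih (a + 1) (by omega) (by omega)]
      rw [PySem.List.pySetD_of_nonneg res 'M' ha]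
      rw [List.length_set, List.getElem?_set]
      by_cases hja : (j : Int) = a
      · rw [if_neg (show ¬(a + 1 ≤ (j : Int) ∧ (j : Int) < n ∧ j < res.length ∧ p (j : Int)) by
              intro h; omega),
            if_pos (show a.toNat = j by omega)]
        by_cases hl : j < res.length
        · have hpj : p (j : Int) := by rw [hja]; exact hpa
          rw [if_pos (show a.toNat < res.length by omega),
              if_pos (show a ≤ (j : Int) ∧ (j : Int) < n ∧ j < res.length ∧ p (j : Int) from
                ⟨by omega, by omega, hl, hpj⟩)]
        · rw [if_neg (show ¬ a.toNat < res.length by omega),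
              if_neg (show ¬(a ≤ (j : Int) ∧ (j : Int) < n ∧ j < res.length ∧ p (j : Int)) by
                intro h; exact hl h.2.2.1),
              List.getElem?_eq_none (by omega)]
      · rw [if_neg (show ¬ a.toNat = j by omega)]
        by_cases h1 : a + 1 ≤ (j : Int) ∧ (j : Int) < n ∧ j < res.length ∧ p (j : Int)
        · rw [if_pos h1,
              if_pos (show a ≤ (j : Int) ∧ (j : Int) < n ∧ j < res.length ∧ p (j : Int) from
                ⟨by omega, h1.2.1, h1.2.2.1, h1.2.2.2⟩)]
        · rw [if_neg h1,
              if_neg (show ¬(a ≤ (j : Int) ∧ (j : Int) < n ∧ j < res.length ∧ p (j : Int)) by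
                intro h; exact h1 ⟨by omega, h.2.1, h.2.2.1, h.2.2.2⟩)]
    · rw [if_neg hpa]
      rw [ih (a + 1) (by omega) (by omega)]
      by_cases h1 : a + 1 ≤ (j : Int) ∧ (j : Int) < n ∧ j < res.length ∧ p (j : Int)
      · rw [if_pos h1,
            if_pos (show a ≤ (j : Int) ∧ (j : Int) < n ∧ j < res.length ∧ p (j : Int) from
              ⟨by omega, h1.2.1, h1.2.2.1, h1.2.2.2⟩)]
      · rw [if_neg h1,
            if_neg (show ¬(a ≤ (j : Int) ∧ (j : Int) < n ∧ j < res.length ∧ p (j : Int)) by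
              intro h
              by_cases hja : (j : Int) = a
              · exact hpa (hja ▸ h.2.2.2)
              · exact h1 ⟨by omega, h.2.1, h.2.2.1, h.2.2.2⟩)]

theorem pv_innerB_len (n : Int) (p : Int → Prop) [DecidablePred p] (res : List Char) :
    ((PySem.List.pyRange 0 n 1).foldl
        (fun r i => if p i then PySem.List.pySetD r i 'M' else r) res).length = res.length := by
  induction PySem.List.pyRange 0 n 1 generalizing res with
  | nil => rfl
  | cons i t ih =>
    simp only [List.foldl]
    rw [ih]
    split_ifs
    · exact PySem.List.length_pySetD res i 'M'
    · rfl

-- characterization of B's outer loop over the remaining bitsets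
theorem pv_foldOuter_get? (n : Int) (q : String → Int → Prop) [∀ b i, Decidable (q b i)] :
    ∀ (rows : List String) (res : List Char) (j : Nat),
      ((rows.foldl (fun r b =>
          (PySem.List.pyRange 0 n 1).foldl
            (fun r' i => if q b i then PySem.List.pySetD r' i 'M' else r') r) res))[j]? =
        if (j : Int) < n ∧ j < res.length ∧ ∃ b ∈ rows, q b (j : Int)
        then some 'M' else res[j]? := by
  intro rows
  induction rows with
  | nil =>
    intro res j
    simp only [List.foldl]
    rw [if_neg (by simp)]
  | cons b bs ih =>
    intro res j
    simp only [List.foldl]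
    rw [ih]
    rw [pv_innerB_len n (q b) res]
    rw [pv_foldB_get? n (q b) (n - 0).toNat 0 (by omega) rfl res j]
    have hj0 : (0 : Int) ≤ (j : Int) := Int.natCast_nonneg j
    split_ifs with h1 h2 h3 h4 h5
    · rfl
    · exact absurd ⟨h1.1, h1.2.1, by
        rcases h1.2.2 with ⟨b', hb', hq⟩
        exact ⟨b', List.mem_cons_of_mem _ hb', hq⟩⟩ h2
    · rfl
    · exact absurd ⟨h3.2.1, h3.2.2.1, b, List.mem_cons_self, h3.2.2.2⟩ h4
    · exfalso
      rcases h5.2.2 with ⟨b', hb', hq⟩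
      rcases List.mem_cons.1 hb' with rfl | hb''
      · exact h3 ⟨hj0, h5.1, h5.2.1, hq⟩
      · exact h1 ⟨h5.1, h5.2.1, b', hb'', hq⟩
    · rfl

-- ===== VERDICT (by name: the statement is the Claim_ definition above) =====
theorem detect_metastability_spec : Claim_equal_detect_metastability := by
  intro bitsets _hdom hpre
  unfold Spec_detect_metastability
  obtain ⟨hne, hlen⟩ := hpre
  obtain ⟨b0, bs, rfl⟩ : ∃ b0 bs, bitsets = b0 :: bs := by
    cases bitsets with
    | nil => exact absurd rfl hne
    | cons x xs => exact ⟨x, xs, rfl⟩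
  unfold detect_metastability detect_metastability_alt
  simp only [PySem.List.pyGet?_zero_cons, Option.getD_some, PySem.List.slice_from_one,
    List.tail_cons]
  set first := b0.toList with hfirst
  set n : Int := (first.length : Int) with hn
  have hlen0 : ∀ s ∈ bs, first.length ≤ s.toList.length := by
    intro s hs
    have := hlen s (by simp [hs])
    simpa using this
  congr 1
  apply List.ext_getElem?
  intro j
  rw [pv_foldA_get? n
        (fun i => 1 < PySem.Set.len (PySem.Set.ofList ((b0 :: bs).map
              (fun bitset => (PySem.List.pyGet? bitset.toList i).getD ' '))))
        (fun i => (PySem.List.pyGet? ((b0 :: bs).map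
              (fun bitset => (PySem.List.pyGet? bitset.toList i).getD ' ')) 0).getD ' ')
        (n - 0).toNat 0 (by omega) rfl]
  rw [pv_foldOuter_get? n
        (fun bitset i => (PySem.List.pyGet? bitset.toList i).getD ' ' ≠ (PySem.List.pyGet? first i).getD ' ')
        bs first j]
  simp only [List.length_replicate]
  by_cases hj : j < first.length
  · have hjn : (j : Int) < n := by omega
    have hget0 : PySem.List.pyGet? first (j : Int) = some first[j] := by
      rw [PySem.List.pyGet?_natCast]
      exact List.getElem?_eq_getElem hj
    rw [if_pos ⟨by omega, hjn, by omega⟩]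
    simp only [List.map_cons, PySem.List.pyGet?_zero_cons, Option.getD_some]
    rw [hget0]
    simp only [Option.getD_some]
    rw [List.getElem?_eq_getElem hj]
    by_cases hdiff : ∃ b ∈ bs, (PySem.List.pyGet? b.toList (j : Int)).getD ' ' ≠ first[j]
    · have hcard : 1 < PySem.Set.len (PySem.Set.ofList (first[j] ::
          bs.map (fun bitset => (PySem.List.pyGet? bitset.toList (j : Int)).getD ' '))) := by
        rcases hdiff with ⟨b, hb, hq⟩
        exact (pv_set_card_gt_one _ _).2
          ⟨(PySem.List.pyGet? b.toList (j : Int)).getD ' ', List.mem_map.2 ⟨b, hb, rfl⟩, hq⟩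
      rw [if_pos hcard, if_pos ⟨hjn, hj, hdiff⟩]
    · have hcard : ¬ 1 < PySem.Set.len (PySem.Set.ofList (first[j] ::
          bs.map (fun bitset => (PySem.List.pyGet? bitset.toList (j : Int)).getD ' '))) := by
        intro h
        rcases (pv_set_card_gt_one _ _).1 h with ⟨x, hx, hxne⟩
        rcases List.mem_map.1 hx with ⟨b, hb, rfl⟩
        exact hdiff ⟨b, hb, hxne⟩
      rw [if_neg hcard, if_neg (fun h => hdiff h.2.2)]
  · rw [if_neg (by omega), if_neg (by omega)]
    rw [List.getElem?_eq_none (by simpa using by omega),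
        List.getElem?_eq_none (by omega)]
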